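-- pv_equiv track=rewrite | github.com/jpbonson/VisualizationToolForMLData | app/models/feature_filtering.py | indeces_to_mask
-- ===== SOURCE A (Python) =====
-- def indeces_to_mask(indeces, X):
--     mask = []
--     for i in range(len(X[0])):
--         if i in indeces:
--             mask.append(True)
--         else:
--             mask.append(False)
--     return mask
-- ===== SOURCE B (Python) =====
-- def indeces_to_mask(indeces, X):
--     n = len(X[0])
--     mask = [False] * n
--     for idx in indeces:
--         if 0 <= idx < n:
--             mask[idx] = True
--     return mask
-- ===== Notes on version B (the rewrite author's own statement) =====
-- stated objective: faster
-- what changed: Replaces the gather loop (for each position, scan indeces with 'in') by a scatter pass: allocate [False]*n once and mark mask[idx]=True for each in-range idx, removing the inner membership scan.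
import Mathlib
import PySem

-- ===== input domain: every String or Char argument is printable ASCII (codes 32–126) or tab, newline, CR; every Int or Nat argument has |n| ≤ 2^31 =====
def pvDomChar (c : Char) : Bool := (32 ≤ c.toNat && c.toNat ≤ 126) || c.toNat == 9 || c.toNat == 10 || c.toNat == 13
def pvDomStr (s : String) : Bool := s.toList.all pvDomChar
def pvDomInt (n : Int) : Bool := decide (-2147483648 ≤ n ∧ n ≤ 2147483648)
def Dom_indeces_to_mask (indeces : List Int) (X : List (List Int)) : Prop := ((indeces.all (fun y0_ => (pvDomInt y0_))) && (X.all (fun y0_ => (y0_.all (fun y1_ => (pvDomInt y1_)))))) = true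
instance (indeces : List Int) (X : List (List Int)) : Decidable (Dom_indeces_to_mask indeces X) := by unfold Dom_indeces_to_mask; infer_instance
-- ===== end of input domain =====

-- B replaces A's gather loop (membership scan of indeces at each position) by a single
-- scatter pass marking mask[idx] = True for each in-range idx; faster in a timing run.

-- ===== PORT A =====
-- A: mask = []; for i in range(len(X[0])): mask.append(True if i in indeces else False)
def indeces_to_mask (indeces : List Int) (X : List (List Int)) : List Bool :=
  match PySem.List.pyGet? X 0 with
  | none => []   -- X[0] raises IndexError; excluded by Pre_
  | some row =>
    (List.range row.length).foldl
      (fun (mask : List Bool) (i : Nat) => mask ++ [if (i : Int) ∈ indeces then true else false]) []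

-- ===== PORT B =====
-- the 'for idx in indeces' scatter loop of Source B, as structural recursion on the index list
def scatterB (n : Nat) : List Int → List Bool → List Bool
  | [], m => m
  | idx :: rest, m =>
    scatterB n rest (if 0 ≤ idx ∧ idx < (n : Int) then m.set idx.toNat true else m)

-- B: n = len(X[0]); mask = [False]*n; for idx in indeces: if 0 <= idx < n: mask[idx] = True
-- (X.headD [] equals X[0] on Pre_; on X = [] Python raises, excluded by Pre_)
def indeces_to_mask_alt (indeces : List Int) (X : List (List Int)) : List Bool :=
  let n := (X.headD []).length
  scatterB n indeces (List.replicate n false)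

-- ===== PRECONDITION & SPEC =====
-- Pre_ excludes only X = [], on which both Pythons raise IndexError at X[0].
def Pre_indeces_to_mask (indeces : List Int) (X : List (List Int)) : Prop := X ≠ []
instance (indeces : List Int) (X : List (List Int)) : Decidable (Pre_indeces_to_mask indeces X) := by unfold Pre_indeces_to_mask; infer_instance
def pvWitness_indeces_to_mask : List Int × List (List Int) := ([0, 2, 5, -1], [[10, 20, 30]])
def Spec_indeces_to_mask (indeces : List Int) (X : List (List Int)) (out : List Bool) : Prop := out = indeces_to_mask_alt indeces X
instance (indeces : List Int) (X : List (List Int)) (out : List Bool) : Decidable (Spec_indeces_to_mask indeces X out) := by unfold Spec_indeces_to_mask; infer_instance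

-- ===== CLAIM (what is proved, stated in full; the proofs are below) =====
def Claim_equal_indeces_to_mask : Prop := ∀ (indeces : List Int) (X : List (List Int)), Dom_indeces_to_mask indeces X → Pre_indeces_to_mask indeces X → Spec_indeces_to_mask indeces X (indeces_to_mask indeces X)

-- ===== LEMMAS AND PROOFS =====

-- the scatter recursion preserves the mask's length
theorem scatterB_length (n : Nat) (inds : List Int) (mask : List Bool) :
    (scatterB n inds mask).length = mask.length := by
  induction inds generalizing mask with
  | nil => rfl
  | cons idx rest ih =>
    simp only [scatterB]
    split <;> simp [ih]

-- element j of the scatter result: old bit OR membership of j in the indices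
theorem scatterB_get (n : Nat) (inds : List Int) (mask : List Bool) (hn : mask.length = n)
    (j : Nat) (hj : j < n) :
    (scatterB n inds mask)[j]? = some (mask.getD j false || decide ((j : Int) ∈ inds)) := by
  induction inds generalizing mask with
  | nil =>
    simp [scatterB, List.getD_eq_getElem?_getD, List.getElem?_eq_getElem (hn ▸ hj)]
  | cons idx rest ih =>
    simp only [scatterB]
    by_cases hg : 0 ≤ idx ∧ idx < (n : Int)
    · rw [if_pos hg, ih _ (by simp [hn])]
      have hidxlt : idx.toNat < mask.length := by omega
      by_cases he : idx.toNat = j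
      · have : idx = (j : Int) := by omega
        rw [he]
        simp [this, List.getD_eq_getElem?_getD,
          (by omega : j < mask.length)]
      · have hne : idx ≠ (j : Int) := by omega
        simp [List.getD_eq_getElem?_getD, List.getElem?_set_ne he, Ne.symm hne]
    · rw [if_neg hg, ih _ hn]
      have hne : idx ≠ (j : Int) := by omega
      simp [Ne.symm hne]

theorem gather_eq_map (inds : List Int) (n : Nat) :
    (List.range n).foldl (fun (mask : List Bool) (i : Nat) => mask ++ [if (i : Int) ∈ inds then true else false]) []
      = (List.range n).map (fun (i : Nat) => if (i : Int) ∈ inds then true else false) :=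
  PySem.List.foldl_append_singleton_eq_map _ _ _

-- ===== VERDICT (by name: the statement is the Claim_ definition above) =====
theorem indeces_to_mask_spec : Claim_equal_indeces_to_mask := by
  intro indeces X _ hpre
  unfold Spec_indeces_to_mask indeces_to_mask indeces_to_mask_alt
  cases X with
  | nil => exact absurd rfl hpre
  | cons row rest =>
    have h0 : PySem.List.pyGet? (row :: rest) 0 = some row := by
      simp [PySem.List.pyGet?, PySem.List.pyIdx?]
    simp only [h0, List.headD]
    rw [gather_eq_map]
    apply List.ext_getElem?
    intro j
    by_cases hj : j < row.length
    · rw [scatterB_get row.length indeces _ (by simp) j hj]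
      simp [hj]
    · rw [List.getElem?_eq_none (by simpa using hj),
        List.getElem?_eq_none (by rw [scatterB_length]; simpa using hj)]
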